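-- pv_equiv track=rewrite | github.com/OlaszPL/Introduction_to_computer_science_course | Zestaw4/zad15.py | zad15
-- ===== SOURCE A (Python) =====
-- from math import isqrt
--
-- def is_prime(n):
--     if n == 0 or n == 1:
--         return False
--     if n == 2 or n == 3:
--         return True
--     if n % 2 == 0 or n % 3 == 0:
--         return False
--
--     i = 5
--
--     while i <= isqrt(n):
--         if n % i == 0:
--             return False
--         else:
--             i += 2
--             if n % i == 0:
--                 return False
--             else:
--                 i += 4
--
--     return True
--
-- def zad15(T):
--     n = len(T)
--
--     for row in range(n):
--         flag = True
--         if flag: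
--             for column in range(n):
--                 tmp = T[row][column]
--                 inner_flag = False
--                 while tmp > 0 and not inner_flag:
--                     if is_prime(tmp % 10):
--                         inner_flag = True
--                     tmp //= 10
--                 if not inner_flag:
--                     flag = False
--         if flag:
--             return True
--
--     return False
-- ===== SOURCE B (Python) =====
-- def contains_prime_digit(x):
--     return x > 0 and any(c in '2357' for c in str(x))
--
-- def zad15(T):
--     n = len(T)
--     return any(all([contains_prime_digit(T[i][j]) for j in range(n)]) for i in range(n))
-- ===== Notes on version B (the rewrite author's own statement) =====
-- stated objective: simpler
-- what changed: B tests each element for a prime digit by scanning the characters of str(x) for '2357' instead of A's arithmetic %10-//10 digit loop with trial-division is_prime, and expresses the row/column scan as any/all over range(n), removing the flag/inner_flag bookkeeping.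
-- outside the precondition, e.g. on zad15([[2, 2], [2]]): A returns True, B returns True
import Mathlib
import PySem

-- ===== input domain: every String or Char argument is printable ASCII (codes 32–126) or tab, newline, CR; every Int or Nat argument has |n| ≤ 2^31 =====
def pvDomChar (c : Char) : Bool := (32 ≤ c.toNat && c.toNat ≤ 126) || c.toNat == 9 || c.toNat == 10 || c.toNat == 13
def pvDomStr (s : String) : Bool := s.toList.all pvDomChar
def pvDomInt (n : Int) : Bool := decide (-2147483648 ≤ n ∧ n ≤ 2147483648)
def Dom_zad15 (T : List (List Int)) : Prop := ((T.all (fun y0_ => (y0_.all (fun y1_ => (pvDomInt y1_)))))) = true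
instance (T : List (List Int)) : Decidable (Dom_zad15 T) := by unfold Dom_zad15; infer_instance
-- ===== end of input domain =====

-- B replaces A's arithmetic digit loop + trial-division primality test by a scan of str(x)
-- for a character in "2357", and the flag bookkeeping by any/all — objective: simpler.

-- ===== PORT A =====
-- is_prime's while loop (i is only ever called with 0 ≤ n ≤ 9 here; Int.sqrt = math.isqrt on 0 ≤ n)
def isPrimeLoop (n : Int) (i : Int) : Bool :=
  if _h : i ≤ Int.sqrt n then
    if PySem.Int.mod n i == 0 then false
    else if PySem.Int.mod n (i + 2) == 0 then false
    else isPrimeLoop n (i + 6)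
  else true
termination_by (Int.sqrt n + 1 - i).toNat
decreasing_by omega

def isPrime (n : Int) : Bool :=
  if n == 0 || n == 1 then false
  else if n == 2 || n == 3 then true
  else if PySem.Int.mod n 2 == 0 || PySem.Int.mod n 3 == 0 then false
  else isPrimeLoop n 5

-- the inner `while tmp > 0 and not inner_flag` loop, threading inner_flag
def innerLoop (tmp : Int) (flag : Bool) : Bool :=
  if _h : decide (tmp > 0) && !flag then
    innerLoop (PySem.Int.floordiv tmp 10) (if isPrime (PySem.Int.mod tmp 10) then true else flag)
  else flag
termination_by tmp.toNat
decreasing_by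
  simp only [Bool.and_eq_true, decide_eq_true_eq] at _h
  rw [PySem.Int.floordiv_eq_ediv_of_pos (by norm_num)]
  omega

-- the `for column in range(n)` loop, threading flag
def colLoop (T : List (List Int)) (row : Nat) : List Nat → Bool → Bool
  | [], flag => flag
  | c :: cs, flag =>
      let tmp := (PySem.List.pyGet? ((PySem.List.pyGet? T (row : Int)).getD []) (c : Int)).getD 0
      let innerFlag := innerLoop tmp false
      colLoop T row cs (if !innerFlag then false else flag)

-- the `for row in range(n)` loop with the early `return True`
def rowLoop (T : List (List Int)) (n : Nat) : List Nat → Bool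
  | [] => false
  | r :: rs => if colLoop T r (List.range n) true then true else rowLoop T n rs

def zad15 (T : List (List Int)) : Bool :=
  let n := T.length
  rowLoop T n (List.range n)

-- ===== PORT B =====
def pdChar (c : Char) : Bool := c == '2' || c == '3' || c == '5' || c == '7'   -- c in '2357'

def containsPrimeDigit (x : Int) : Bool :=
  decide (x > 0) && (PySem.Int.toStr x).toList.any pdChar

def zad15_alt (T : List (List Int)) : Bool :=
  let n := T.length
  (List.range n).any (fun i =>
    ((List.range n).map (fun j =>
      containsPrimeDigit ((PySem.List.pyGet? ((PySem.List.pyGet? T (i : Int)).getD []) (j : Int)).getD 0))).all id)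

-- ===== PRECONDITION & SPEC =====
-- Pre_ excludes jagged tables (some row shorter than len(T)), on which the T[i][j] indexing of
-- both A and B raises IndexError unless an earlier row already succeeded (then both return True).
def Pre_zad15 (T : List (List Int)) : Prop := ∀ r ∈ T, T.length ≤ r.length
instance (T : List (List Int)) : Decidable (Pre_zad15 T) := by unfold Pre_zad15; infer_instance
def pvWitness_zad15 : List (List Int) := [[2, 4], [10, 37]]

def Spec_zad15 (T : List (List Int)) (out : Bool) : Prop := out = zad15_alt T
instance (T : List (List Int)) (out : Bool) : Decidable (Spec_zad15 T out) := by unfold Spec_zad15; infer_instance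

-- ===== CLAIM (what is proved, stated in full; the proofs are below) =====
def Claim_equal_zad15 : Prop := ∀ (T : List (List Int)), Dom_zad15 T → Pre_zad15 T → Spec_zad15 T (zad15 T)

-- ===== LEMMAS AND PROOFS =====

-- arithmetic "some decimal digit of n is prime", common reference form
def natHas (n : Nat) : Bool :=
  (n % 10 == 2 || n % 10 == 3 || n % 10 == 5 || n % 10 == 7) ||
  (if h : n / 10 = 0 then false else natHas (n / 10))
termination_by n
decreasing_by omega

theorem isPrime_digit (d : Nat) (hd : d < 10) :
    isPrime (d : Int) = (d == 2 || d == 3 || d == 5 || d == 7) := by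
  interval_cases d <;> simp [isPrime, isPrimeLoop, PySem.Int.mod, Int.sqrt] <;>
    exact Nat.sqrt_lt.mpr (by norm_num)

theorem innerLoop_true (x : Int) : innerLoop x true = true := by
  rw [innerLoop]; simp

theorem innerLoop_eq_natHas (x : Int) (hx : 0 < x) : innerLoop x false = natHas x.toNat := by
  rw [innerLoop, natHas]
  have hxc : (x.toNat : Int) = x := Int.toNat_of_nonneg (le_of_lt hx)
  have hmod : PySem.Int.mod x 10 = ((x.toNat % 10 : Nat) : Int) := by
    rw [← hxc]; exact_mod_cast PySem.Int.mod_natCast x.toNat 10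
  have hdiv : PySem.Int.floordiv x 10 = ((x.toNat / 10 : Nat) : Int) := by
    rw [← hxc]; exact_mod_cast PySem.Int.floordiv_natCast x.toNat 10
  simp only [hx, decide_true, Bool.not_false, Bool.and_true, dite_eq_ite, if_true, hmod, hdiv,
    isPrime_digit (x.toNat % 10) (Nat.mod_lt _ (by norm_num))]
  by_cases hp : (x.toNat % 10 == 2 || x.toNat % 10 == 3 || x.toNat % 10 == 5 ||
      x.toNat % 10 == 7) = true
  · simp [hp, innerLoop_true]
  · simp only [Bool.not_eq_true] at hp
    simp only [hp, Bool.false_eq_true, if_false, Bool.false_or]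
    by_cases hz : x.toNat / 10 = 0
    · simp only [hz, if_pos, Nat.cast_zero]
      rw [innerLoop]; simp
    · have hpos : 0 < ((x.toNat / 10 : Nat) : Int) := by exact_mod_cast Nat.pos_of_ne_zero hz
      rw [if_neg hz, innerLoop_eq_natHas _ hpos, Int.toNat_natCast]
termination_by x.toNat
decreasing_by rw [Int.toNat_natCast]; omega

theorem pdChar_digitChar (d : Nat) (hd : d < 10) :
    pdChar (Nat.digitChar d) = (d == 2 || d == 3 || d == 5 || d == 7) := by
  interval_cases d <;> decide

theorem toDigitsCore_any (fuel : Nat) :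
    ∀ (n : Nat) (acc : List Char), n < 10 ^ fuel →
      (Nat.toDigitsCore 10 fuel n acc).any pdChar = (natHas n || acc.any pdChar) := by
  induction fuel with
  | zero =>
    intro n acc h
    have hn : n = 0 := by simpa using h
    subst hn
    rw [natHas]
    simp [Nat.toDigitsCore]
  | succ f ih =>
    intro n acc h
    rw [natHas]
    simp only [Nat.toDigitsCore]
    by_cases hz : n / 10 = 0
    · simp [hz, pdChar_digitChar (n % 10) (Nat.mod_lt _ (by norm_num))]
    · rw [if_neg hz, ih (n / 10) _ (by omega), dif_neg hz]
      simp [pdChar_digitChar (n % 10) (Nat.mod_lt _ (by norm_num)),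
        Bool.or_comm, Bool.or_left_comm]

theorem innerLoop_eq_contains (x : Int) : innerLoop x false = containsPrimeDigit x := by
  by_cases hx : 0 < x
  · rw [innerLoop_eq_natHas x hx]
    have hneg : ¬ x < 0 := by omega
    have hb : x.toNat < 10 ^ (x.toNat + 1) := by
      calc x.toNat < 10 ^ x.toNat := Nat.lt_pow_self (by norm_num)
        _ ≤ 10 ^ (x.toNat + 1) := Nat.pow_le_pow_right (by norm_num) (by omega)
    simp [containsPrimeDigit, hx, PySem.Int.toList_toStr, PySem.Int.toChars, hneg,
      Nat.toDigits, toDigitsCore_any (x.toNat + 1) x.toNat [] hb]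
  · rw [innerLoop]
    simp [containsPrimeDigit, hx]

theorem colLoop_eq (T : List (List Int)) (row : Nat) :
    ∀ (cs : List Nat) (flag : Bool),
      colLoop T row cs flag =
        (flag && cs.all (fun c =>
          innerLoop ((PySem.List.pyGet? ((PySem.List.pyGet? T (row : Int)).getD []) (c : Int)).getD 0) false)) := by
  intro cs
  induction cs with
  | nil => intro flag; simp [colLoop]
  | cons c cs ih =>
    intro flag
    simp only [colLoop, ih, List.all_cons]
    cases innerLoop ((PySem.List.pyGet? ((PySem.List.pyGet? T (row : Int)).getD []) (c : Int)).getD 0) false <;>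
      cases flag <;> simp

theorem rowLoop_eq (T : List (List Int)) (n : Nat) :
    ∀ rs : List Nat, rowLoop T n rs = rs.any (fun r => colLoop T r (List.range n) true) := by
  intro rs
  induction rs with
  | nil => simp [rowLoop]
  | cons r rs ih =>
    simp only [rowLoop, ih, List.any_cons]
    cases colLoop T r (List.range n) true <;> simp

-- ===== VERDICT (by name: the statement is the Claim_ definition above) =====
theorem zad15_spec : Claim_equal_zad15 := by
  intro T _hDom _hPre
  unfold Spec_zad15 zad15 zad15_alt
  rw [rowLoop_eq]
  simp [colLoop_eq, innerLoop_eq_contains, List.all_map]
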